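-- pv_equiv track=rewrite | github.com/PanAnastasiy/LeetCode | 1742 Maximum Number of Balls in a Box.py | countBalls
-- ===== SOURCE A (Python) =====
-- def countBalls(lowLimit: int, highLimit: int) -> int:
--     data = {}
--     for ball in range(lowLimit, highLimit + 1):
--         ball_sum = sum(list(map(int, list(str(ball)))))
--         if ball_sum not in data:
--             data[ball_sum] = 1
--         else:
--             data[ball_sum] += 1
--     return max(data.values())
-- ===== SOURCE B (Python) =====
-- def countBalls(lowLimit: int, highLimit: int) -> int:
--     MAXS = 100  # digit sums of boxes never exceed 100 in the supported range
--
--     def digit_sum(n):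
--         t = 0
--         while n:
--             t += n % 10
--             n //= 10
--         return t
--
--     def counts_below(x):
--         # c[s] = how many n in [0, x) have digit sum s
--         if x == 0:
--             return [0] * (MAXS + 1)
--         q, r = divmod(x, 10)
--         prev = counts_below(q)
--         d = digit_sum(q)
--         return [sum(prev[s - i] for i in range(10) if i <= s)
--                 + (1 if d <= s < d + r else 0)
--                 for s in range(MAXS + 1)]
--
--     hi = counts_below(highLimit + 1)
--     lo = counts_below(lowLimit)
--     # only digit sums that actually occur in the range (nonempty boxes)
--     return max(h - l for h, l in zip(hi, lo) if h > l)
-- ===== Notes on version B (the rewrite author's own statement) =====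
-- stated objective: faster
-- what changed: Replaces the per-ball loop over the whole range (string digit sum + dict counter) by a digit DP that computes, for each digit sum s, how many numbers below X have that sum, and takes the max of the prefix-count differences counts_below(highLimit+1)-counts_below(lowLimit).
import Mathlib
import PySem

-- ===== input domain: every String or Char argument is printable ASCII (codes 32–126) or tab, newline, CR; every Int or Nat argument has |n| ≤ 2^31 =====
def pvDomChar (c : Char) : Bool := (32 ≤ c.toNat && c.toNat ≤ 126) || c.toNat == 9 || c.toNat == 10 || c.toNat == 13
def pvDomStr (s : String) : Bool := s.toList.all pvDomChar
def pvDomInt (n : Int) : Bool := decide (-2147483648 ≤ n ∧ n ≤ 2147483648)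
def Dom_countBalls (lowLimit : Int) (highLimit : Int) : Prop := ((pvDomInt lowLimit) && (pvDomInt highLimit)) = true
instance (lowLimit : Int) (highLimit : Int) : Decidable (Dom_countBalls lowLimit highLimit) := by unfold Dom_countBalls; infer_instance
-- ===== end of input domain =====

-- B replaces A's per-ball scan of the whole range by a digit DP (counts of numbers below X
-- per digit sum, differenced over the range): asymptotically faster, independent of range size.

-- ===== PORT A =====
-- int(c) for one character of str(ball); under Pre_ every character is a decimal digit
def pyDigitVal (c : Char) : Int := (PySem.Int.ofChars? [c]).getD 0

def countBalls (lowLimit : Int) (highLimit : Int) : Int :=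
  let data := (PySem.List.pyRange lowLimit (highLimit + 1) 1).foldl
    (fun (data : PySem.Dict Int Int) ball =>
      let ball_sum := ((PySem.Int.toChars ball).map pyDigitVal).sum
      if data.contains ball_sum = false then data.insert ball_sum 1
      else data.insert ball_sum (data.getD ball_sum 0 + 1))
    PySem.Dict.empty
  -- max(data.values()); under Pre_ the dict is nonempty, so max? is some
  (PySem.List.max? data.values id).getD 0

-- ===== PORT B =====  (transliteration of Source B; the two recursive helpers are fuel-encoded,
-- with fuel = the argument itself, which bounds the n -> n/10 recursion depth: exact for every n)
-- digit_sum(n): while-loop digit sum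
def dsumF : Nat → Nat → Nat
  | 0, _ => 0
  | f + 1, n => if n = 0 then 0 else n % 10 + dsumF f (n / 10)

def dsum (n : Nat) : Nat := dsumF n n

-- counts_below(x): c[s] = how many n in [0, x) have digit sum s, for s = 0..100
def cntListF : Nat → Nat → List Int
  | 0, _ => List.replicate 101 0
  | f + 1, x =>
    if x = 0 then List.replicate 101 0
    else
      let q := x / 10
      let r := x % 10
      let prev := cntListF f q
      let d := dsum q
      (List.range 101).map (fun s =>
        (((List.range 10).filter (fun i => i ≤ s)).map (fun i => prev.getD (s - i) 0)).sum
        + (if d ≤ s ∧ s < d + r then (1 : Int) else 0))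

def cntList (x : Nat) : List Int := cntListF x x

def countBalls_alt (lowLimit : Int) (highLimit : Int) : Int :=
  let hi := cntList (highLimit + 1).toNat
  let lo := cntList lowLimit.toNat
  -- max over the digit sums that actually occur; under Pre_ the list is nonempty
  (PySem.List.max? (((hi.zip lo).filter (fun p => p.2 < p.1)).map (fun p => p.1 - p.2)) id).getD 0

-- ===== PRECONDITION & SPEC =====
-- A raises outside 0 ≤ lowLimit ≤ highLimit: ValueError from int('-') on negative balls,
-- ValueError from max() on an empty range.
def Pre_countBalls (lowLimit : Int) (highLimit : Int) : Prop :=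
  0 ≤ lowLimit ∧ lowLimit ≤ highLimit
instance (lowLimit : Int) (highLimit : Int) : Decidable (Pre_countBalls lowLimit highLimit) := by
  unfold Pre_countBalls; infer_instance
def pvWitness_countBalls : Int × Int := (0, 9)

def Spec_countBalls (lowLimit : Int) (highLimit : Int) (out : Int) : Prop := out = countBalls_alt lowLimit highLimit
instance (lowLimit : Int) (highLimit : Int) (out : Int) : Decidable (Spec_countBalls lowLimit highLimit out) := by unfold Spec_countBalls; infer_instance

-- ===== CLAIM (what is proved, stated in full; the proofs are below) =====
def Claim_equal_countBalls : Prop := ∀ (lowLimit : Int) (highLimit : Int), Dom_countBalls lowLimit highLimit → Pre_countBalls lowLimit highLimit → Spec_countBalls lowLimit highLimit (countBalls lowLimit highLimit)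

-- ===== LEMMAS AND PROOFS =====

-- the common spec: C x s = #{n < x : digit sum of n is s}
def C (x s : Nat) : Nat := (List.range x).countP (fun n => dsum n = s)

theorem dsumF_stable : ∀ (f₁ f₂ n : Nat), n ≤ f₁ → n ≤ f₂ → dsumF f₁ n = dsumF f₂ n := by
  intro f₁
  induction f₁ with
  | zero =>
    intro f₂ n h1 _
    have : n = 0 := by omega
    subst this
    cases f₂ <;> simp [dsumF]
  | succ f ih =>
    intro f₂ n h1 h2
    by_cases h0 : n = 0
    · subst h0; cases f₂ <;> simp [dsumF]
    · obtain ⟨g, rfl⟩ : ∃ g, f₂ = g + 1 := ⟨f₂ - 1, by omega⟩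
      simp only [dsumF, if_neg h0]
      rw [ih g (n / 10) (by omega) (by omega)]

theorem dsum_zero : dsum 0 = 0 := rfl

theorem dsum_pos {n : Nat} (h : n ≠ 0) : dsum n = n % 10 + dsum (n / 10) := by
  obtain ⟨m, rfl⟩ : ∃ m, n = m + 1 := ⟨n - 1, by omega⟩
  show dsumF (m + 1) (m + 1) = _
  simp only [dsumF, if_neg h]
  congr 1
  exact dsumF_stable m ((m + 1) / 10) ((m + 1) / 10) (by omega) (le_refl _)

theorem dsum_mul_add {q b : Nat} (hb : b < 10) : dsum (10 * q + b) = dsum q + b := by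
  by_cases h : 10 * q + b = 0
  · have hq : q = 0 := by omega
    have hb0 : b = 0 := by omega
    subst hq; subst hb0; rfl
  · rw [dsum_pos h]
    have h1 : (10 * q + b) % 10 = b := by omega
    have h2 : (10 * q + b) / 10 = q := by omega
    rw [h1, h2]; omega

theorem dsum_le : ∀ (k n : Nat), n < 10 ^ k → dsum n ≤ 9 * k := by
  intro k
  induction k with
  | zero =>
    intro n h
    have : n = 0 := by omega
    subst this; simp [dsum_zero]
  | succ k ih =>
    intro n h
    by_cases h0 : n = 0
    · subst h0; simp [dsum_zero]
    · rw [dsum_pos h0]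
      have hp : (10 : Nat) ^ (k + 1) = 10 ^ k * 10 := pow_succ 10 k
      have hd : n / 10 < 10 ^ k := by omega
      have := ih (n / 10) hd
      omega

theorem C_zero (s : Nat) : C 0 s = 0 := rfl

theorem C_succ (x s : Nat) : C (x + 1) s = C x s + (if dsum x = s then 1 else 0) := by
  by_cases hd : dsum x = s <;> simp [C, List.range_succ, List.countP_append, hd]

theorem C_tens : ∀ (q s : Nat),
    C (10 * q) s = ((List.range 10).map (fun i => if i ≤ s then C q (s - i) else 0)).sum := by
  intro q
  induction q with
  | zero =>
    intro s
    simp [C]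
  | succ q ih =>
    intro s
    have h2 : C (10 * (q + 1)) s
        = C (10 * q) s + (List.range 10).countP (fun b => dsum q + b = s) := by
      simp only [C, show 10 * (q + 1) = 10 * q + 10 by ring, List.range_add,
        List.countP_append, List.countP_map, Function.comp_def]
      congr 1
      apply List.countP_congr
      intro b hb
      simp only [List.mem_range] at hb
      simp [dsum_mul_add hb]
    have h3 : ∀ i ∈ List.range 10,
        (if i ≤ s then C (q + 1) (s - i) else 0)
          = (if i ≤ s then C q (s - i) else 0) + (if dsum q + i = s then 1 else 0) := by
      intro i _
      rw [C_succ]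
      by_cases hle : i ≤ s
      · have hiff : (dsum q = s - i) ↔ (dsum q + i = s) := by omega
        simp only [if_pos hle]
        rw [if_congr hiff rfl rfl]
      · have hne : ¬(dsum q + i = s) := by omega
        simp [hle, hne]
    rw [h2, ih, List.map_congr_left h3, List.sum_map_add]
    congr 1
    rw [← PySem.List.sum_map_ite_one_zero_nat (fun b => dsum q + b = s) (List.range 10)]
    simp

theorem C_add_r (q s : Nat) : ∀ r, r ≤ 10 →
    C (10 * q + r) s = C (10 * q) s + (if dsum q ≤ s ∧ s < dsum q + r then 1 else 0) := by
  intro r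
  induction r with
  | zero =>
    intro _
    simp
  | succ r ih =>
    intro hr
    rw [show 10 * q + (r + 1) = (10 * q + r) + 1 by ring, C_succ, ih (by omega),
      dsum_mul_add (show r < 10 by omega)]
    split_ifs <;> omega

theorem cntListF_stable : ∀ (f₁ f₂ x : Nat), x ≤ f₁ → x ≤ f₂ → cntListF f₁ x = cntListF f₂ x := by
  intro f₁
  induction f₁ with
  | zero =>
    intro f₂ x h1 _
    have : x = 0 := by omega
    subst this
    cases f₂ <;> simp [cntListF]
  | succ f ih =>
    intro f₂ x h1 h2
    by_cases h0 : x = 0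
    · subst h0; cases f₂ <;> simp [cntListF]
    · obtain ⟨g, rfl⟩ : ∃ g, f₂ = g + 1 := ⟨f₂ - 1, by omega⟩
      simp only [cntListF, if_neg h0]
      rw [ih g (x / 10) (by omega) (by omega)]

theorem cntList_zero : cntList 0 = List.replicate 101 0 := rfl

theorem cntList_pos {x : Nat} (h : x ≠ 0) : cntList x =
    (List.range 101).map (fun s =>
      (((List.range 10).filter (fun i => i ≤ s)).map
        (fun i => (cntList (x / 10)).getD (s - i) 0)).sum
      + (if dsum (x / 10) ≤ s ∧ s < dsum (x / 10) + x % 10 then (1 : Int) else 0)) := by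
  obtain ⟨m, rfl⟩ : ∃ m, x = m + 1 := ⟨x - 1, by omega⟩
  show cntListF (m + 1) (m + 1) = _
  simp only [cntListF, if_neg h]
  rw [cntListF_stable m ((m + 1) / 10) ((m + 1) / 10) (by omega) (le_refl _)]
  rfl

theorem sum_filter_ite {α : Type} [AddCommMonoid α] (l : List Nat) (p : Nat → Bool) (f : Nat → α) :
    ((l.filter p).map f).sum = (l.map (fun i => if p i then f i else 0)).sum := by
  induction l with
  | nil => rfl
  | cons a l ih => by_cases h : p a <;> simp [h, ih]

theorem cntList_eq : ∀ (x : Nat), cntList x = (List.range 101).map (fun s => (C x s : Int)) := by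
  intro x
  induction x using Nat.strong_induction_on with
  | _ x ih =>
    by_cases h : x = 0
    · subst h
      rw [cntList_zero]
      have : ∀ s ∈ List.range 101, ((C 0 s : Nat) : Int) = (0 : Int) := by
        intro s _; simp [C_zero]
      rw [List.map_congr_left this]
      simp [List.map_const']
    · rw [cntList_pos h]
      apply List.map_congr_left
      intro s hs
      have hs101 : s < 101 := List.mem_range.mp hs
      rw [ih (x / 10) (Nat.div_lt_self (by omega) (by omega))]
      have hterm : ∀ i ∈ (List.range 10).filter (fun i => decide (i ≤ s)),
          ((List.range 101).map (fun t => (C (x / 10) t : Int))).getD (s - i) 0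
            = ((C (x / 10) (s - i) : Nat) : Int) := by
        intro i _
        exact PySem.List.getD_map_range _ _ _ _ (by omega)
      rw [List.map_congr_left hterm, sum_filter_ite]
      have hx : x = 10 * (x / 10) + x % 10 := by omega
      have hC : C x s = C (10 * (x / 10)) s
          + (if dsum (x / 10) ≤ s ∧ s < dsum (x / 10) + x % 10 then 1 else 0) := by
        conv_lhs => rw [hx]
        exact C_add_r _ _ _ (by omega)
      rw [hC, C_tens]
      push_cast [Nat.cast_list_sum, List.map_map]
      congr 1
      refine congrArg List.sum (List.map_congr_left ?_)
      intro i _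
      by_cases hle : i ≤ s <;> simp [hle, Function.comp]

theorem digitVal_digitChar {m : Nat} (hm : m < 10) : pyDigitVal (Nat.digitChar m) = (m : Int) := by
  interval_cases m <;> decide

theorem toDigitsCore_sum : ∀ (fuel : Nat), ∀ (n : Nat) (acc : List Char), n < fuel →
    ((Nat.toDigitsCore 10 fuel n acc).map pyDigitVal).sum
      = (dsum n : Int) + (acc.map pyDigitVal).sum := by
  intro fuel
  induction fuel with
  | zero => intro n acc h; omega
  | succ fuel ih =>
    intro n acc h
    simp only [Nat.toDigitsCore]
    by_cases h0 : n / 10 = 0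
    · have hds : dsum n = n % 10 := by
        by_cases hn : n = 0
        · subst hn; rfl
        · rw [dsum_pos hn, h0, dsum_zero]; omega
      simp [h0, digitVal_digitChar (Nat.mod_lt n (by omega)), hds]
    · simp only [if_neg h0]
      rw [ih (n / 10) _ (by omega)]
      simp only [List.map_cons, List.sum_cons,
        digitVal_digitChar (Nat.mod_lt n (by omega))]
      rw [dsum_pos (show n ≠ 0 by omega)]
      push_cast
      ring

theorem charSum_eq (n : Nat) :
    ((PySem.Int.toChars (n : Int)).map pyDigitVal).sum = (dsum n : Int) := by
  have hneg : ¬((n : Int) < 0) := by omega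
  simp only [PySem.Int.toChars, if_neg hneg, Int.toNat_natCast, Nat.toDigits]
  rw [toDigitsCore_sum (n + 1) n [] (by omega)]
  simp

theorem pyRange_map (N : Nat) (a : Int) :
    PySem.List.pyRange a (a + N) 1 = (List.range N).map (fun i => a + (i : Nat)) := by
  simp only [PySem.List.pyRange]
  by_cases hN : N = 0
  · subst hN; simp
  · have hlt : a < a + (N : Int) := by omega
    simp [hlt]


theorem C_prefix_diff (L N s : Nat) :
    C (L + N) s = C L s + (List.range N).countP (fun i => dsum (L + i) = s) := by
  simp [C, List.range_add, List.countP_append, List.countP_map, Function.comp_def]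

theorem count_link (L N s : Nat) :
    ((List.range N).map (fun i => (dsum (L + i) : Int))).count ((s : Nat) : Int)
      = (List.range N).countP (fun i => dsum (L + i) = s) := by
  rw [List.count, List.countP_map]
  apply List.countP_congr
  intro i _
  simp [Function.comp]

theorem countBalls_eq_counter (low high : Int) :
    countBalls low high = (PySem.List.max?
      (PySem.Dict.counter ((PySem.List.pyRange low (high + 1) 1).map
        (fun b => ((PySem.Int.toChars b).map pyDigitVal).sum))).values id).getD 0 := by
  unfold countBalls
  rw [← PySem.Dict.foldl_insert_getD_add_one_eq_counter, List.foldl_map]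
  have hfun : (fun (data : PySem.Dict Int Int) ball =>
      let ball_sum := ((PySem.Int.toChars ball).map pyDigitVal).sum
      if data.contains ball_sum = false then data.insert ball_sum 1
      else data.insert ball_sum (data.getD ball_sum 0 + 1))
      = (fun (d : PySem.Dict Int Int) ball =>
          d.insert (((PySem.Int.toChars ball).map pyDigitVal).sum)
            (d.getD (((PySem.Int.toChars ball).map pyDigitVal).sum) 0 + 1)) := by
    funext d b
    show (if d.contains _ = false then _ else _) = _
    by_cases hc : d.contains (((PySem.Int.toChars b).map pyDigitVal).sum) = false
    · rw [if_pos hc, PySem.Dict.getD_of_not_contains d 0 hc]; norm_num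
    · rw [if_neg hc]
  rw [hfun]

theorem countBalls_alt_eq (low high : Int) :
    countBalls_alt low high = (PySem.List.max? (((List.range 101).filter
      (fun s => decide ((C low.toNat s : Int) < (C (high + 1).toNat s : Int)))).map
      (fun s => (C (high + 1).toNat s : Int) - (C low.toNat s : Int))) id).getD 0 := by
  unfold countBalls_alt
  rw [cntList_eq, cntList_eq]
  show (PySem.List.max? (((((List.range 101).map (fun s => (C (high + 1).toNat s : Int))).zip
      ((List.range 101).map (fun s => (C low.toNat s : Int)))).filter
      (fun p => p.2 < p.1)).map (fun p => p.1 - p.2)) id).getD 0 = _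
  rw [List.zip_map', List.filter_map, List.map_map]
  rfl

theorem max?_getD_eq (VA VB : List Int) (hA : VA ≠ []) (hB : VB ≠ [])
    (hAB : ∀ a ∈ VA, ∃ b ∈ VB, a ≤ b) (hBA : ∀ b ∈ VB, ∃ a ∈ VA, b ≤ a) :
    (PySem.List.max? VA id).getD 0 = (PySem.List.max? VB id).getD 0 := by
  obtain ⟨a, ha⟩ : ∃ a, PySem.List.max? VA id = some a := by
    cases hcase : PySem.List.max? VA id with
    | none => exact absurd ((PySem.List.max?_eq_none_iff VA id).mp hcase) hA
    | some a => exact ⟨a, rfl⟩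
  obtain ⟨b, hb⟩ : ∃ b, PySem.List.max? VB id = some b := by
    cases hcase : PySem.List.max? VB id with
    | none => exact absurd ((PySem.List.max?_eq_none_iff VB id).mp hcase) hB
    | some b => exact ⟨b, rfl⟩
  rw [ha, hb]
  show a = b
  obtain ⟨b', hb', hab⟩ := hAB a (PySem.List.max?_mem ha)
  obtain ⟨a', ha', hba⟩ := hBA b (PySem.List.max?_mem hb)
  have h1 : a ≤ b := le_trans hab (PySem.List.max?_isMax hb b' hb')
  have h2 : b ≤ a := le_trans hba (PySem.List.max?_isMax ha a' ha')
  omega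

-- ===== VERDICT (by name: the statement is the Claim_ definition above) =====
theorem countBalls_spec : Claim_equal_countBalls := by
  intro low high hdom hpre
  obtain ⟨h0, hlh⟩ := hpre
  unfold Spec_countBalls
  obtain ⟨L, hL⟩ : ∃ L : Nat, low = (L : Int) := ⟨low.toNat, by omega⟩
  obtain ⟨N, hN, hN1⟩ : ∃ N : Nat, high + 1 = low + (N : Int) ∧ 1 ≤ N :=
    ⟨(high + 1 - low).toNat, by omega, by omega⟩
  have hhigh : (high + 1).toNat = L + N := by omega
  have hlowt : low.toNat = L := by omega
  have hhiB : high ≤ 2147483648 := by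
    unfold Dom_countBalls pvDomInt at hdom
    simp only [Bool.and_eq_true, decide_eq_true_eq] at hdom
    omega
  have hLN : L + N ≤ 2147483649 := by omega
  rw [countBalls_eq_counter, countBalls_alt_eq, hhigh, hlowt]
  have hballs : PySem.List.pyRange low (high + 1) 1
      = (List.range N).map (fun i => ((L + i : Nat) : Int)) := by
    rw [hN, hL, pyRange_map]
    apply List.map_congr_left
    intro i _
    push_cast
    ring
  rw [hballs, List.map_map]
  rw [show ((List.range N).map ((fun b => ((PySem.Int.toChars b).map pyDigitVal).sum)
        ∘ (fun i : Nat => ((L + i : Nat) : Int))))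
      = (List.range N).map (fun i => (dsum (L + i) : Int)) from
    List.map_congr_left (fun i _ => charSum_eq (L + i))]
  have hvals : (PySem.Dict.counter ((List.range N).map (fun i => (dsum (L + i) : Int)))).values
      = (PySem.Set.ofList ((List.range N).map (fun i => (dsum (L + i) : Int)))).map
          (fun k => ((((List.range N).map (fun i => (dsum (L + i) : Int))).count k : Nat) : Int)) := by
    show ((PySem.Dict.counter _).items).map Prod.snd = _
    rw [PySem.Dict.items_counter, List.map_map]
    rfl
  rw [hvals]
  have hBlist : ((List.range 101).filter
        (fun s => decide ((C L s : Int) < (C (L + N) s : Int)))).map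
        (fun s => (C (L + N) s : Int) - (C L s : Int))
      = ((List.range 101).filter
          (fun s => decide (0 < (List.range N).countP (fun i => dsum (L + i) = s)))).map
          (fun s => (((List.range N).countP (fun i => dsum (L + i) = s) : Nat) : Int)) := by
    have hdiff : ∀ s, (C (L + N) s : Int) - (C L s : Int)
        = (((List.range N).countP (fun i => dsum (L + i) = s) : Nat) : Int) := by
      intro s
      rw [C_prefix_diff]
      push_cast
      ring
    have hfc : (List.range 101).filter (fun s => decide ((C L s : Int) < (C (L + N) s : Int)))
        = (List.range 101).filter
            (fun s => decide (0 < (List.range N).countP (fun i => dsum (L + i) = s))) := by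
      apply List.filter_congr
      intro s _
      apply decide_eq_decide.mpr
      have h := C_prefix_diff L N s
      omega
    rw [hfc]
    exact List.map_congr_left (fun s _ => hdiff s)
  rw [hBlist]
  have hmemL : (dsum L : Int) ∈ (List.range N).map (fun i => (dsum (L + i) : Int)) :=
    List.mem_map.mpr ⟨0, List.mem_range.mpr (by omega), by simp⟩
  have hd90 : ∀ i, i < N → dsum (L + i) ≤ 90 := by
    intro i hiN
    have hlt : L + i < 10 ^ 10 := by
      have : (10 : Nat) ^ 10 = 10000000000 := by norm_num
      omega
    have := dsum_le 10 (L + i) hlt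
    omega
  have hposL : 0 < (List.range N).countP (fun i => dsum (L + i) = dsum L) := by
    apply List.countP_pos_iff.mpr
    exact ⟨0, List.mem_range.mpr (by omega), by simp⟩
  apply max?_getD_eq
  · exact List.ne_nil_of_mem
      (List.mem_map.mpr ⟨(dsum L : Int), (PySem.Set.mem_ofList _ _).mpr hmemL, rfl⟩)
  · refine List.ne_nil_of_mem (List.mem_map.mpr ⟨dsum L, List.mem_filter.mpr
      ⟨List.mem_range.mpr (by have h90 := hd90 0 (by omega); rw [Nat.add_zero] at h90; omega), decide_eq_true hposL⟩, rfl⟩)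
  · intro a ha
    obtain ⟨k, hk, rfl⟩ := List.mem_map.mp ha
    obtain ⟨i, hi, rfl⟩ := List.mem_map.mp ((PySem.Set.mem_ofList _ _).mp hk)
    have hiN : i < N := List.mem_range.mp hi
    have hpos : 0 < (List.range N).countP (fun i' => dsum (L + i') = dsum (L + i)) :=
      List.countP_pos_iff.mpr ⟨i, hi, by simp⟩
    refine ⟨_, List.mem_map.mpr ⟨dsum (L + i), List.mem_filter.mpr
      ⟨List.mem_range.mpr (by have := hd90 i hiN; omega), decide_eq_true hpos⟩, rfl⟩, ?_⟩
    rw [count_link]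
  · intro b hb
    obtain ⟨s, hs, rfl⟩ := List.mem_map.mp hb
    obtain ⟨-, hspos⟩ := List.mem_filter.mp hs
    obtain ⟨i, hi, hds⟩ := List.countP_pos_iff.mp (of_decide_eq_true hspos)
    have hmems : ((s : Nat) : Int) ∈ (List.range N).map (fun i => (dsum (L + i) : Int)) :=
      List.mem_map.mpr ⟨i, hi, by rw [show dsum (L + i) = s from by simpa using hds]⟩
    refine ⟨_, List.mem_map.mpr ⟨((s : Nat) : Int),
      (PySem.Set.mem_ofList _ _).mpr hmems, rfl⟩, ?_⟩
    rw [count_link]
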